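-- pv_equiv track=rewrite | github.com/eulermstrg/python_exercises | alg.py | cortar_barras
-- ===== SOURCE A (Python) =====
-- def cortar_barras(tubos, comprimento_barra):
--     barras = []
--     tipo_contador = {}
--
--     for tubo_tipo, tamanhos in tubos.items():
--         tamanhos.sort(reverse=True)  # Ordenar tamanhos em ordem decrescente
--         tipo_contador[tubo_tipo] = tipo_contador.get(tubo_tipo, 0) + 1
--         while tamanhos:
--             barra_atual = []
--             comprimento_restante = comprimento_barra
--
--             for tamanho in tamanhos[:]:
--                 if tamanho <= comprimento_restante:
--                     barra_atual.append(tamanho)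
--                     comprimento_restante -= tamanho
--                     tamanhos.remove(tamanho)
--
--             barras.append((tubo_tipo, barra_atual, comprimento_restante, tipo_contador[tubo_tipo]))
--             tipo_contador[tubo_tipo] += 1
--
--     return barras
-- ===== SOURCE B (Python) =====
-- def _corta_uma_barra(restantes, comprimento):
--     # One bar: a single pass over the descending sizes, splitting them into
--     # the pieces cut from this bar and the leftovers for the next bars.
--     barra, sobra, resto = [], [], comprimento
--     for x in restantes:
--         if x <= resto:
--             barra.append(x)
--             resto -= x
--         else:
--             sobra.append(x)
--     return barra, sobra, resto
--
--
-- def cortar_barras(tubos, comprimento_barra):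
--     # Return-value equivalent to A; unlike A it does NOT mutate the caller's
--     # lists (A sorts them in place and empties them).
--     barras = []
--     for tipo, tamanhos in tubos.items():
--         restantes = sorted(tamanhos, reverse=True)
--         num = 1
--         while restantes:
--             barra, restantes, resto = _corta_uma_barra(restantes, comprimento_barra)
--             barras.append((tipo, barra, resto, num))
--             num += 1
--     return barras
-- ===== Notes on version B (the rewrite author's own statement) =====
-- stated objective: alternative
-- what changed: Each bar is packed by one partition pass over the descending sizes (pieces-cut vs leftovers) instead of A's per-bar list copy plus a linear .remove scan for every piece taken, and the per-type counter dict is replaced by a plain local counter; B does not mutate the caller's lists (A sorts and empties them in place).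
import Mathlib
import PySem

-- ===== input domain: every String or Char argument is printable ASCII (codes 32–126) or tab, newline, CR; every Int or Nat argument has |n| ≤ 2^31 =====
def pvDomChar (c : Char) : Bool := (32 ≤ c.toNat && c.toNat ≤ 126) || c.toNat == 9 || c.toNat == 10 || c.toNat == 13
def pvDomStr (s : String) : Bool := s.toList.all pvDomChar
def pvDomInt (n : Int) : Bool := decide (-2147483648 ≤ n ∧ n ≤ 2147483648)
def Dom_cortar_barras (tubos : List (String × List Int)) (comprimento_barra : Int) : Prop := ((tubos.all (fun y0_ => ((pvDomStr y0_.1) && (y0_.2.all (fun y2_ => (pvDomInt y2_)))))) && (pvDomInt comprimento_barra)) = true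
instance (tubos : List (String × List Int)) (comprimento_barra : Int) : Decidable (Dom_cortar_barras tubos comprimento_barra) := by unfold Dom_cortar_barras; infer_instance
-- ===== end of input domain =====

-- B packs each bar with one partition pass over the descending sizes (no per-element
-- list copy / .remove scan and no counter dict), same return value as A; A mutates the
-- caller's lists (sorts and empties them in place), B does not — the claim is about the
-- return value only.


-- ===== PORT A =====
-- A's inner `for tamanho in tamanhos[:]`: snapshot is the iterated copy, live is the
-- mutated list (remove never misses on the reachable states; getD is a no-op default).
def pvForA (snapshot : List Int) (barra : List Int) (resto : Int) (live : List Int) :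
    List Int × Int × List Int :=
  match snapshot with
  | [] => (barra, resto, live)
  | x :: rest =>
    if x ≤ resto then
      pvForA rest (barra ++ [x]) (resto - x) ((PySem.List.remove? live x).getD live)
    else
      pvForA rest barra resto live

-- A's `while tamanhos:` loop; fuel bounds the number of bars (the Python loop diverges
-- when some size never fits, which Pre_ excludes; one bar removes ≥ 1 element there).
def pvWhileA (fuel : Nat) (tipo : String) (tam : List Int) (cb : Int)
    (d : PySem.Dict String Int) :
    List (String × List Int × Int × Int) × PySem.Dict String Int :=
  match fuel with
  | 0 => ([], d)
  | fuel + 1 =>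
    match tam with
    | [] => ([], d)
    | _ =>
      let r := pvForA tam [] cb tam
      let cnt := d.getD tipo 0
      let d' := d.insert tipo (cnt + 1)
      let rec' := pvWhileA fuel tipo r.2.2 cb d'
      ((tipo, r.1, r.2.1, cnt) :: rec'.1, rec'.2)

def cortar_barras (tubos : List (String × List Int)) (comprimento_barra : Int) :
    List (String × List Int × Int × Int) :=
  (tubos.foldl
    (fun (acc : List (String × List Int × Int × Int) × PySem.Dict String Int) p =>
      let tam := PySem.List.sorted p.2 (fun x => x) true
      let d1 := acc.2.insert p.1 (acc.2.getD p.1 0 + 1)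
      let r := pvWhileA (tam.length + 1) p.1 tam comprimento_barra d1
      (acc.1 ++ r.1, r.2))
    ([], PySem.Dict.empty)).1

-- ===== PORT B =====
-- one bar: single pass splitting the sizes into (cut pieces, leftovers, leftover length)
def pvCorta (restantes : List Int) (resto : Int) : List Int × List Int × Int :=
  match restantes with
  | [] => ([], [], resto)
  | x :: xs =>
    if x ≤ resto then
      let r := pvCorta xs (resto - x)
      (x :: r.1, r.2.1, r.2.2)
    else
      let r := pvCorta xs resto
      (r.1, x :: r.2.1, r.2.2)

def pvBarsB (fuel : Nat) (tipo : String) (restantes : List Int) (cb : Int) (num : Int) :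
    List (String × List Int × Int × Int) :=
  match fuel with
  | 0 => []
  | fuel + 1 =>
    match restantes with
    | [] => []
    | _ =>
      let r := pvCorta restantes cb
      (tipo, r.1, r.2.2, num) :: pvBarsB fuel tipo r.2.1 cb (num + 1)

def cortar_barras_alt (tubos : List (String × List Int)) (comprimento_barra : Int) :
    List (String × List Int × Int × Int) :=
  tubos.flatMap (fun p =>
    let restantes := PySem.List.sorted p.2 (fun x => x) true
    pvBarsB (restantes.length + 1) p.1 restantes comprimento_barra 1)

-- ===== PRECONDITION & SPEC =====
-- Pre_ excludes (a) inputs with a size larger than comprimento_barra, on which A's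
-- `while` loop never terminates (the piece never fits any bar), and (b) association
-- lists with duplicate type keys, which a Python dict argument cannot represent.
def Pre_cortar_barras (tubos : List (String × List Int)) (comprimento_barra : Int) : Prop :=
  (∀ p ∈ tubos, ∀ x ∈ p.2, x ≤ comprimento_barra) ∧ (tubos.map Prod.fst).Nodup
instance (tubos : List (String × List Int)) (comprimento_barra : Int) : Decidable (Pre_cortar_barras tubos comprimento_barra) := by unfold Pre_cortar_barras; infer_instance

def pvWitness_cortar_barras : (List (String × List Int)) × Int :=
  ([("a", [3, 5, 2]), ("b", [7])], 8)

def Spec_cortar_barras (tubos : List (String × List Int)) (comprimento_barra : Int) (out : List (String × List Int × Int × Int)) : Prop := out = cortar_barras_alt tubos comprimento_barra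
instance (tubos : List (String × List Int)) (comprimento_barra : Int) (out : List (String × List Int × Int × Int)) : Decidable (Spec_cortar_barras tubos comprimento_barra out) := by unfold Spec_cortar_barras; infer_instance

-- ===== CLAIM (what is proved, stated in full; the proofs are below) =====
def Claim_equal_cortar_barras : Prop := ∀ (tubos : List (String × List Int)) (comprimento_barra : Int), Dom_cortar_barras tubos comprimento_barra → Pre_cortar_barras tubos comprimento_barra → Spec_cortar_barras tubos comprimento_barra (cortar_barras tubos comprimento_barra)

-- ===== LEMMAS AND PROOFS =====

-- removing a value absent from the skipped prefix hits exactly the head of the suffix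
lemma remove_prefix (kept rest : List Int) (x : Int) (hx : x ∉ kept) :
    PySem.List.remove? (kept ++ x :: rest) x = some (kept ++ rest) := by
  induction kept with
  | nil => simp
  | cons y ys ih =>
    have hy : y ≠ x := by intro h; exact hx (h ▸ List.mem_cons_self)
    have hxs : x ∉ ys := fun h => hx (List.mem_cons_of_mem _ h)
    simp [List.cons_append, PySem.List.remove?_cons_of_ne _ hy, ih hxs]

-- A's snapshot/remove pass computes B's partition pass.
-- kept = the elements skipped so far; each is above the current remainder or above
-- everything still to come, so no later removal can hit it.
lemma passA (s : List Int) : ∀ (kept b : List Int) (r : Int),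
    s.Pairwise (fun a b => b ≤ a) →
    (∀ y ∈ kept, r < y ∨ ∀ x ∈ s, x < y) →
    pvForA s b r (kept ++ s) =
      (b ++ (pvCorta s r).1, (pvCorta s r).2.2, kept ++ (pvCorta s r).2.1) := by
  induction s with
  | nil => intro kept b r _ _; simp [pvForA, pvCorta]
  | cons x xs ih =>
    intro kept b r hp hk
    rw [pvForA, pvCorta]
    by_cases hx : x ≤ r
    · have hxk : x ∉ kept := by
        intro hm
        rcases hk x hm with h | h
        · omega
        · exact absurd (h x List.mem_cons_self) (lt_irrefl x)
      simp only [hx, if_pos, remove_prefix kept xs x hxk, Option.getD_some]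
      have hk' : ∀ y ∈ kept, r - x < y ∨ ∀ z ∈ xs, z < y := by
        intro y hy
        rcases hk y hy with h | h
        · by_cases h0 : 0 ≤ x
          · left; omega
          · right; intro z hz
            have : z ≤ x := (List.pairwise_cons.mp hp).1 z hz
            omega
        · right; intro z hz; exact h z (List.mem_cons_of_mem _ hz)
      rw [ih kept (b ++ [x]) (r - x) (List.pairwise_cons.mp hp).2 hk']
      simp
    · simp only [hx, if_neg, not_false_iff]
      have hk' : ∀ y ∈ kept ++ [x], r < y ∨ ∀ z ∈ xs, z < y := by
        intro y hy
        rcases List.mem_append.mp hy with h | h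
        · rcases hk y h with h' | h'
          · left; exact h'
          · right; intro z hz; exact h' z (List.mem_cons_of_mem _ hz)
        · left; simp at h; omega
      have := ih (kept ++ [x]) b r (List.pairwise_cons.mp hp).2 hk'
      rw [List.append_assoc] at this
      simp only [List.singleton_append] at this
      rw [this]
      simp

-- the leftovers of a pass are a sublist of the input (order preserved)
lemma pvCorta_sobra_sublist (s : List Int) : ∀ r : Int, (pvCorta s r).2.1.Sublist s := by
  induction s with
  | nil => intro r; simp [pvCorta]
  | cons x xs ih =>
    intro r
    rw [pvCorta]
    by_cases hx : x ≤ r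
    · simp only [hx, if_pos]
      exact (ih (r - x)).cons x
    · simp only [hx, if_neg, not_false_iff]
      exact (ih r).cons₂ x

-- A's while loop emits B's bars when the counter dict currently holds n at this type
lemma whileA_eq_barsB (tipo : String) (cb : Int) :
    ∀ (fuel : Nat) (l : List Int) (d : PySem.Dict String Int) (n : Int),
    l.Pairwise (fun a b => b ≤ a) → d.getD tipo 0 = n →
    (pvWhileA fuel tipo l cb d).1 = pvBarsB fuel tipo l cb n := by
  intro fuel
  induction fuel with
  | zero => intro l d n _ _; rfl
  | succ fuel ih =>
    intro l d n hp hd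
    match l with
    | [] => rfl
    | x :: xs =>
      rw [pvWhileA, pvBarsB]
      have hpass := passA (x :: xs) [] [] cb hp (by simp)
      simp only [List.nil_append] at hpass
      simp only [hpass, hd]
      have hsub := pvCorta_sobra_sublist (x :: xs) cb
      have hp' : (pvCorta (x :: xs) cb).2.1.Pairwise (fun a b => b ≤ a) :=
        List.Pairwise.sublist hsub hp
      have hd' : (d.insert tipo (n + 1)).getD tipo 0 = n + 1 :=
        PySem.Dict.getD_insert_self d tipo (n + 1) 0
      rw [ih (pvCorta (x :: xs) cb).2.1 (d.insert tipo (n + 1)) (n + 1) hp' hd']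
      all_goals simp

-- the while loop only touches the entry of its own type
lemma whileA_dict_other (tipo : String) (cb : Int) (k : String) (hk : k ≠ tipo) :
    ∀ (fuel : Nat) (l : List Int) (d : PySem.Dict String Int),
    ((pvWhileA fuel tipo l cb d).2).getD k 0 = d.getD k 0 := by
  intro fuel
  induction fuel with
  | zero => intro l d; rfl
  | succ fuel ih =>
    intro l d
    match l with
    | [] => rfl
    | x :: xs =>
      rw [pvWhileA]
      simp only
      rw [ih]
      · exact PySem.Dict.getD_insert_of_ne d _ _ hk
      all_goals simp

-- main fold invariant: every still-unprocessed type is absent from the counter dict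
lemma foldA_eq (cb : Int) :
    ∀ (tubos : List (String × List Int)) (acc : List (String × List Int × Int × Int))
      (d : PySem.Dict String Int),
    (∀ p ∈ tubos, d.getD p.1 0 = 0) → (tubos.map Prod.fst).Nodup →
    (tubos.foldl
      (fun (acc : List (String × List Int × Int × Int) × PySem.Dict String Int) p =>
        let tam := PySem.List.sorted p.2 (fun x => x) true
        let d1 := acc.2.insert p.1 (acc.2.getD p.1 0 + 1)
        let r := pvWhileA (tam.length + 1) p.1 tam cb d1
        (acc.1 ++ r.1, r.2))
      (acc, d)).1 =
      acc ++ tubos.flatMap (fun p =>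
        let restantes := PySem.List.sorted p.2 (fun x => x) true
        pvBarsB (restantes.length + 1) p.1 restantes cb 1) := by
  intro tubos
  induction tubos with
  | nil => intro acc d _ _; simp
  | cons p rest ih =>
    intro acc d hd hnd
    rw [List.foldl_cons, List.flatMap_cons]
    simp only
    set tam := PySem.List.sorted p.2 (fun x => x) true with htam
    have hd0 : d.getD p.1 0 = 0 := hd p List.mem_cons_self
    have hd1 : (d.insert p.1 (d.getD p.1 0 + 1)).getD p.1 0 = 1 := by
      rw [hd0, PySem.Dict.getD_insert_self]; norm_num
    have hpair : tam.Pairwise (fun a b => b ≤ a) :=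
      PySem.List.sorted_pairwise_rev p.2 (fun x => x)
    have hbars := whileA_eq_barsB p.1 cb (tam.length + 1) tam
      (d.insert p.1 (d.getD p.1 0 + 1)) 1 hpair hd1
    have hnd' : p.1 ∉ rest.map Prod.fst ∧ (rest.map Prod.fst).Nodup := by
      rw [List.map_cons, List.nodup_cons] at hnd; exact hnd
    have hrest : ∀ q ∈ rest,
        ((pvWhileA (tam.length + 1) p.1 tam cb (d.insert p.1 (d.getD p.1 0 + 1))).2).getD q.1 0 = 0 := by
      intro q hq
      have hne : q.1 ≠ p.1 := by
        intro h
        exact hnd'.1 (h ▸ List.mem_map_of_mem (f := Prod.fst) hq)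
      rw [whileA_dict_other p.1 cb q.1 hne,
          PySem.Dict.getD_insert_of_ne d _ _ hne]
      exact hd q (List.mem_cons_of_mem _ hq)
    rw [ih (acc ++ (pvWhileA (tam.length + 1) p.1 tam cb (d.insert p.1 (d.getD p.1 0 + 1))).1)
        _ hrest hnd'.2, hbars, List.append_assoc]

-- ===== VERDICT (by name: the statement is the Claim_ definition above) =====
theorem cortar_barras_spec : Claim_equal_cortar_barras := by
  intro tubos cb _ hpre
  unfold Spec_cortar_barras cortar_barras cortar_barras_alt
  exact foldA_eq cb tubos [] PySem.Dict.empty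
    (fun p _ => by simp [pysem]) hpre.2
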